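-- pv_equiv track=rewrite | github.com/Loringtonian/chessbot | backend/app/services/openai_realtime_service.py | fen_to_ascii_board
-- ===== SOURCE A (Python) =====
-- def fen_to_ascii_board(fen: str) -> str:
--     """Convert FEN to a readable ASCII board representation."""
--     board_fen = fen.split()[0]
--
--     lines = []
--     lines.append("  a b c d e f g h")
--
--     ranks = board_fen.split('/')
--     for rank_idx, rank in enumerate(ranks):
--         rank_num = 8 - rank_idx
--         row = f"{rank_num} "
--         for char in rank:
--             if char.isdigit():
--                 row += ". " * int(char)
--             else:
--                 row += f"{char} "
--         lines.append(row.rstrip())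
--
--     lines.append("(Uppercase=White, lowercase=Black)")
--     return "\n".join(lines)
-- ===== SOURCE B (Python) =====
-- DIGITS = "0123456789"
--
--
-- def expand(rank: str) -> str:
--     """Expand a FEN rank by whole-string replacement passes: each digit d becomes d dots."""
--     for d in DIGITS:
--         rank = rank.replace(d, "." * int(d))
--     return rank
--
--
-- def fen_to_ascii_board(fen: str) -> str:
--     """Convert FEN to a readable ASCII board representation."""
--     board_fen = fen.split()[0]
--     lines = ["  a b c d e f g h"]
--     for idx, rank in enumerate(board_fen.split('/')):
--         lines.append(" ".join([str(8 - idx)] + list(expand(rank))))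
--     lines.append("(Uppercase=White, lowercase=Black)")
--     return "\n".join(lines)
-- ===== Notes on version B (the rewrite author's own statement) =====
-- stated objective: faster
-- what changed: A expands digits with a per-character conditional scan that interleaves parsing with ' '-suffixed formatting and rstrips each row; B never inspects characters one by one: it rewrites each rank by ten whole-string str.replace passes (digit d -> d dots) and renders a row as one ' '.join over the rank number and the expanded rank's characters, with no stripping.
import Mathlib
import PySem

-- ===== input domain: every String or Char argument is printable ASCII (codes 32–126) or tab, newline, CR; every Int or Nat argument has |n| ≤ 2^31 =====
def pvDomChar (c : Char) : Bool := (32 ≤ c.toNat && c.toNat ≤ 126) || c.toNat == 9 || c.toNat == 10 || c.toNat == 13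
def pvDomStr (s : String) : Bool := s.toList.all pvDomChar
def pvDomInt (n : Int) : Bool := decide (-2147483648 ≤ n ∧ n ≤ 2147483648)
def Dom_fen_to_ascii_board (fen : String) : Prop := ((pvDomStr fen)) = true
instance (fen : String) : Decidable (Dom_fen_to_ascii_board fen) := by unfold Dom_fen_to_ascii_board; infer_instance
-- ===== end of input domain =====

-- B replaces A's per-character conditional scan (+ rstrip) by digit→dots whole-string
-- replace passes and one ' '.join per row; objective: faster (C-level str.replace/join
-- instead of a Python-level character loop; measured).

-- ===== PORT A =====
-- A, step for step: row starts "{rank_num} ", each char appends ". "*int(c) or "c ", then rstrip.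
def fen_to_ascii_board (fen : String) : String :=
  -- fen.split()[0]: IndexError when fen has no words — excluded by Pre_
  let board_fen : List Char := (PySem.Chars.split₀ fen.toList).getD 0 []
  let lines : List (List Char) := [("  a b c d e f g h").toList]
  let ranks := PySem.Chars.splitOn board_fen ['/']
  let lines := (PySem.List.enumerate ranks).foldl (fun ls p =>
      let row : List Char := PySem.Int.toChars (8 - p.1) ++ [' ']
      let row := p.2.foldl (fun row c =>
          if PySem.Chars.isdigit c then
            -- int(c): isdigit c means an ASCII digit here, so ofChars? succeeds (getD unused)
            row ++ PySem.List.pyRepeat ['.', ' '] ((PySem.Int.ofChars? [c]).getD 0)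
          else row ++ [c, ' ']) row
      ls ++ [PySem.Chars.rstrip row]) lines
  let lines := lines ++ [("(Uppercase=White, lowercase=Black)").toList]
  String.ofList (PySem.Chars.join ['\n'] lines)

-- ===== PORT B =====
-- expand: for d in "0123456789": rank = rank.replace(d, "." * int(d))
def pvExpand (rank : List Char) : List Char :=
  ("0123456789").toList.foldl (fun r d =>
      PySem.Chars.replace r [d] (PySem.List.pyRepeat ['.'] ((PySem.Int.ofChars? [d]).getD 0))) rank

def fen_to_ascii_board_alt (fen : String) : String :=
  let board_fen : List Char := (PySem.Chars.split₀ fen.toList).getD 0 []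
  let lines : List (List Char) :=
    [("  a b c d e f g h").toList]
      ++ (PySem.List.enumerate (PySem.Chars.splitOn board_fen ['/'])).map (fun p =>
           -- " ".join([str(8 - idx)] + list(expand(rank)))
           PySem.Chars.join [' '] (PySem.Int.toChars (8 - p.1) :: (pvExpand p.2).map (fun c => [c])))
      ++ [("(Uppercase=White, lowercase=Black)").toList]
  String.ofList (PySem.Chars.join ['\n'] lines)

-- ===== PRECONDITION & SPEC =====
-- Pre_ excludes only the inputs where A raises: fen.split()[0] is an IndexError when fen
-- contains no non-whitespace character (B raises identically there).
def Pre_fen_to_ascii_board (fen : String) : Prop := PySem.Chars.split₀ fen.toList ≠ []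
instance (fen : String) : Decidable (Pre_fen_to_ascii_board fen) := by
  unfold Pre_fen_to_ascii_board; infer_instance

def pvWitness_fen_to_ascii_board : String := "rnbqkbnr/pppppppp/8/8/8/8/PPPPPPPP/RNBQKBNR w KQkq - 0 1"

def Spec_fen_to_ascii_board (fen : String) (out : String) : Prop := out = fen_to_ascii_board_alt fen
instance (fen : String) (out : String) : Decidable (Spec_fen_to_ascii_board fen out) := by
  unfold Spec_fen_to_ascii_board; infer_instance

-- ===== CLAIM (what is proved, stated in full; the proofs are below) =====
def Claim_equal_fen_to_ascii_board : Prop := ∀ (fen : String), Dom_fen_to_ascii_board fen → Pre_fen_to_ascii_board fen → Spec_fen_to_ascii_board fen (fen_to_ascii_board fen)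

-- ===== LEMMAS AND PROOFS =====

-- the per-character substitution both expansions realise
def pvSubst (c : Char) : List Char :=
  if PySem.Chars.isdigit c then PySem.List.pyRepeat ['.'] ((PySem.Int.ofChars? [c]).getD 0)
  else [c]

-- substitution restricted to an already-processed digit list
def pvSubstD (done : List Char) (c : Char) : List Char :=
  if c ∈ done then pvSubst c else [c]

-- str.replace with a one-character pattern is a flatMap substitution
theorem pv_replace_go_single (d : Char) (new : List Char) :
    ∀ (s : List Char) (fuel : Nat) (acc : List Char), s.length ≤ fuel →
      PySem.Chars.replace.go [d] new fuel s acc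
        = acc.reverse ++ s.flatMap (fun c => if c = d then new else [c]) := by
  intro s
  induction s with
  | nil => intro fuel acc _; cases fuel <;> simp [PySem.Chars.replace.go]
  | cons c t ih =>
      intro fuel acc hf
      cases fuel with
      | zero => simp at hf
      | succ f =>
          simp only [List.length_cons] at hf
          simp only [PySem.Chars.replace.go]
          by_cases hcd : c = d
          · subst hcd
            have hpre : [c].isPrefixOf (c :: t) = true := by simp [List.isPrefixOf]
            rw [if_pos hpre]
            rw [show List.drop (List.length [c]) (c :: t) = t from by simp]
            rw [ih f (new.reverse ++ acc) (by omega)]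
            simp [List.flatMap_cons]
          · have hpre : [d].isPrefixOf (c :: t) = false := by
              simp [List.isPrefixOf]
              exact fun h => absurd h.symm hcd
            rw [if_neg (by simp [hpre])]
            rw [ih f (c :: acc) (by omega)]
            simp [List.flatMap_cons, hcd]

theorem pv_replace_single (s : List Char) (d : Char) (new : List Char) :
    PySem.Chars.replace s [d] new = s.flatMap (fun c => if c = d then new else [c]) := by
  unfold PySem.Chars.replace
  rw [if_neg (by simp)]
  simpa using pv_replace_go_single d new s s.length [] le_rfl

-- every character produced for a digit is a dot
theorem pv_mem_subst_digit (c : Char) (hc : PySem.Chars.isdigit c = true) :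
    ∀ x ∈ pvSubst c, x = '.' := by
  intro x hx
  unfold pvSubst at hx
  rw [if_pos hc] at hx
  unfold PySem.List.pyRepeat at hx
  rcases List.mem_flatten.mp hx with ⟨l, hl, hxl⟩
  rw [List.eq_of_mem_replicate hl] at hxl
  simpa using hxl

-- one replace pass advances the processed-digit substitution by one digit
theorem pv_replace_step (done : List Char) (hdone : ∀ x ∈ done, PySem.Chars.isdigit x = true)
    (d : Char) (hd : PySem.Chars.isdigit d = true) (s : List Char) :
    PySem.Chars.replace (s.flatMap (pvSubstD done)) [d]
        (PySem.List.pyRepeat ['.'] ((PySem.Int.ofChars? [d]).getD 0))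
      = s.flatMap (pvSubstD (done ++ [d])) := by
  rw [pv_replace_single, List.flatMap_assoc]
  apply List.flatMap_congr
  intro c _
  by_cases hmem : c ∈ done
  · have hcd : PySem.Chars.isdigit c = true := hdone c hmem
    have h1 : pvSubstD done c = pvSubst c := by unfold pvSubstD; rw [if_pos hmem]
    have h2 : pvSubstD (done ++ [d]) c = pvSubst c := by
      unfold pvSubstD; rw [if_pos (by simp [hmem])]
    rw [h1, h2]
    have hpt : ∀ x ∈ pvSubst c, (if x = d then PySem.List.pyRepeat ['.'] ((PySem.Int.ofChars? [d]).getD 0) else [x]) = [x] := by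
      intro x hx
      rw [pv_mem_subst_digit c hcd x hx,
          if_neg (show ('.' : Char) ≠ d from fun h => absurd (h ▸ hd) (by decide))]
    calc (pvSubst c).flatMap (fun x => if x = d then PySem.List.pyRepeat ['.'] ((PySem.Int.ofChars? [d]).getD 0) else [x])
        = (pvSubst c).flatMap (fun x => [x]) := List.flatMap_congr hpt
      _ = pvSubst c := by simp
  · have h1 : pvSubstD done c = [c] := by unfold pvSubstD; rw [if_neg hmem]
    rw [h1]
    by_cases hcd : c = d
    · subst hcd
      have h2 : pvSubstD (done ++ [c]) c = pvSubst c := by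
        unfold pvSubstD; rw [if_pos (by simp)]
      rw [h2]
      simp [pvSubst, hd]
    · have h2 : pvSubstD (done ++ [d]) c = [c] := by
        unfold pvSubstD; rw [if_neg (by simp [hmem, hcd])]
      rw [h2]
      simp [hcd]

-- the whole chain of replace passes
theorem pv_replace_chain (ds : List Char) :
    ∀ (done : List Char), (∀ x ∈ ds, PySem.Chars.isdigit x = true) →
      (∀ x ∈ done, PySem.Chars.isdigit x = true) → ∀ (s : List Char),
      ds.foldl (fun r d =>
          PySem.Chars.replace r [d] (PySem.List.pyRepeat ['.'] ((PySem.Int.ofChars? [d]).getD 0)))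
        (s.flatMap (pvSubstD done))
      = s.flatMap (pvSubstD (done ++ ds)) := by
  induction ds with
  | nil => intro done _ _ s; simp
  | cons d rest ih =>
      intro done hds hdone s
      simp only [List.foldl_cons]
      rw [pv_replace_step done hdone d (hds d (by simp)) s]
      rw [ih (done ++ [d]) (fun x hx => hds x (by simp [hx]))
          (by intro x hx; rcases List.mem_append.mp hx with h | h
              · exact hdone x h
              · rw [List.mem_singleton.mp h]; exact hds d (by simp)) s]
      simp

-- a digit character is one of the ten digit literals
theorem pv_isdigit_mem (c : Char) (hc : PySem.Chars.isdigit c = true) :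
    c ∈ ("0123456789").toList := by
  simp only [PySem.Chars.isdigit, Bool.and_eq_true, decide_eq_true_eq] at hc
  obtain ⟨h1, h2⟩ := hc
  have hlo : 48 ≤ c.toNat := h1
  have hhi : c.toNat ≤ 57 := h2
  have hofNat : Char.ofNat c.toNat = c := Char.ofNat_toNat c
  interval_cases h : c.toNat <;> (rw [← hofNat]; decide)

-- pvExpand computes the flatMap substitution
theorem pv_expand_eq_flatMap (rank : List Char) : pvExpand rank = rank.flatMap pvSubst := by
  unfold pvExpand
  have h0 : rank.flatMap (pvSubstD []) = rank := by
    induction rank with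
    | nil => rfl
    | cons c t ih => simp [pvSubstD, ih]
  have hlit : ("0123456789").toList = ['0','1','2','3','4','5','6','7','8','9'] := by decide
  have hall : ∀ x ∈ ("0123456789").toList, PySem.Chars.isdigit x = true := by
    rw [hlit]; intro x hx; fin_cases hx <;> rfl
  conv_lhs => rw [← h0]
  rw [pv_replace_chain ("0123456789").toList [] hall (by simp) rank]
  apply List.flatMap_congr
  intro c _
  by_cases hc : PySem.Chars.isdigit c = true
  · have hmem : c ∈ ("0123456789").toList := pv_isdigit_mem c hc
    unfold pvSubstD
    rw [if_pos (by simpa using hmem)]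
  · have hmem : c ∉ ("0123456789").toList := fun h => hc (hall c h)
    unfold pvSubstD pvSubst
    rw [if_neg (by simpa using hmem), if_neg hc]

-- rstrip: dropping one trailing space
theorem pv_rstrip_append_space (xs : List Char) :
    PySem.Chars.rstrip (xs ++ [' ']) = PySem.Chars.rstrip xs := by
  have h : PySem.Chars.isspace ' ' = true := by decide
  simp [PySem.Chars.rstrip, h]

-- rstrip keeps a non-space last char
theorem pv_rstrip_append_nonspace (xs : List Char) (c : Char)
    (hc : PySem.Chars.isspace c = false) :
    PySem.Chars.rstrip (xs ++ [c]) = xs ++ [c] := by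
  simp [PySem.Chars.rstrip, hc]

-- rstrip is the identity on all-non-space strings
theorem pv_rstrip_eq_self (xs : List Char) (h : ∀ c ∈ xs, PySem.Chars.isspace c = false) :
    PySem.Chars.rstrip xs = xs := by
  induction xs using List.reverseRecOn with
  | nil => rfl
  | append_singleton ys c ih =>
      exact pv_rstrip_append_nonspace ys c (h c (by simp))

-- digitChar never yields whitespace
theorem pv_digitChar_not_space (d : Nat) : PySem.Chars.isspace (Nat.digitChar d) = false := by
  rcases Nat.lt_or_ge d 16 with h | h
  · interval_cases d <;> rfl
  · have : Nat.digitChar d = '*' := by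
      unfold Nat.digitChar
      rw [if_neg (by omega), if_neg (by omega), if_neg (by omega), if_neg (by omega),
          if_neg (by omega), if_neg (by omega), if_neg (by omega), if_neg (by omega),
          if_neg (by omega), if_neg (by omega), if_neg (by omega), if_neg (by omega),
          if_neg (by omega), if_neg (by omega), if_neg (by omega), if_neg (by omega)]
    rw [this]; rfl

theorem pv_toDigitsCore_not_space (fuel n : Nat) (acc : List Char)
    (hacc : ∀ c ∈ acc, PySem.Chars.isspace c = false) :
    ∀ c ∈ Nat.toDigitsCore 10 fuel n acc, PySem.Chars.isspace c = false := by
  induction fuel generalizing n acc with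
  | zero => simpa [Nat.toDigitsCore] using hacc
  | succ f ih =>
      intro c hc
      simp only [Nat.toDigitsCore] at hc
      split at hc
      · rcases List.mem_cons.mp hc with h | h
        · subst h; exact pv_digitChar_not_space _
        · exact hacc c h
      · exact ih _ _ (by
          intro c' hc'
          rcases List.mem_cons.mp hc' with h | h
          · subst h; exact pv_digitChar_not_space _
          · exact hacc c' h) c hc

-- str(n) never contains whitespace
theorem pv_toChars_not_space (n : Int) :
    ∀ c ∈ PySem.Int.toChars n, PySem.Chars.isspace c = false := by
  intro c hc
  unfold PySem.Int.toChars at hc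
  split at hc
  · rcases List.mem_cons.mp hc with h | h
    · subst h; decide
    · exact pv_toDigitsCore_not_space _ _ [] (by simp) c h
  · exact pv_toDigitsCore_not_space _ _ [] (by simp) c hc

-- join over an appended singleton
theorem pv_join_append_singleton (sep p : List Char) (parts : List (List Char))
    (h : parts ≠ []) :
    PySem.Chars.join sep (parts ++ [p]) = PySem.Chars.join sep parts ++ sep ++ p := by
  induction parts with
  | nil => exact absurd rfl h
  | cons q rest ih =>
      cases rest with
      | nil => simp [PySem.Chars.join_cons_cons, PySem.Chars.join_singleton]
      | cons r rs =>
          have h1 : (q :: r :: rs) ++ [p] = q :: (r :: (rs ++ [p])) := rfl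
          rw [h1, PySem.Chars.join_cons_cons]
          have h2 : r :: (rs ++ [p]) = (r :: rs) ++ [p] := rfl
          rw [h2, ih (by simp), PySem.Chars.join_cons_cons]
          simp

-- the cell flattener: each cell becomes "c "
def pvFlat (cells : List Char) : List Char := cells.flatMap (fun c => [c, ' '])

theorem pv_flat_append (cells more : List Char) :
    pvFlat (cells ++ more) = pvFlat cells ++ pvFlat more := by
  simp [pvFlat]

-- B's expansion as the fold A's cells would make (per-character form, proof-only)
def pvExpandRank (rank : List Char) : List Char :=
  rank.foldl (fun cells c =>
      if PySem.Chars.isdigit c then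
        cells ++ PySem.List.pyRepeat ['.'] ((PySem.Int.ofChars? [c]).getD 0)
      else cells ++ [c]) []

theorem pv_expandRank_eq_flatMap (rank : List Char) :
    pvExpandRank rank = rank.flatMap pvSubst := by
  unfold pvExpandRank
  have key : ∀ (l acc : List Char),
      l.foldl (fun cells c =>
          if PySem.Chars.isdigit c then
            cells ++ PySem.List.pyRepeat ['.'] ((PySem.Int.ofChars? [c]).getD 0)
          else cells ++ [c]) acc = acc ++ l.flatMap pvSubst := by
    intro l
    induction l with
    | nil => intro acc; simp
    | cons c rest ih =>
        intro acc
        simp only [List.foldl_cons, List.flatMap_cons]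
        by_cases hd : PySem.Chars.isdigit c = true
        · rw [if_pos hd, ih]; simp [pvSubst, hd]
        · rw [if_neg hd, ih]; simp [pvSubst, hd]
  simpa using key rank []

theorem pv_expand_eq_expandRank (rank : List Char) : pvExpand rank = pvExpandRank rank := by
  rw [pv_expand_eq_flatMap, pv_expandRank_eq_flatMap]

-- A's interleaved row fold equals prefix ++ flattened B cells
theorem pv_inner_fold (rank : List Char) (w : List Char) (cells : List Char) :
    rank.foldl (fun row c =>
        if PySem.Chars.isdigit c then
          row ++ PySem.List.pyRepeat ['.', ' '] ((PySem.Int.ofChars? [c]).getD 0)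
        else row ++ [c, ' ']) (w ++ pvFlat cells)
      = w ++ pvFlat (rank.foldl (fun cells c =>
          if PySem.Chars.isdigit c then
            cells ++ PySem.List.pyRepeat ['.'] ((PySem.Int.ofChars? [c]).getD 0)
          else cells ++ [c]) cells) := by
  induction rank generalizing cells with
  | nil => rfl
  | cons c rest ih =>
      simp only [List.foldl_cons]
      by_cases hd : PySem.Chars.isdigit c = true
      · simp only [hd, if_pos]
        have hrep : pvFlat (PySem.List.pyRepeat ['.'] ((PySem.Int.ofChars? [c]).getD 0))
            = PySem.List.pyRepeat ['.', ' '] ((PySem.Int.ofChars? [c]).getD 0) := by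
          rw [PySem.List.pyRepeat_singleton]
          simp [pvFlat, PySem.List.pyRepeat, List.flatMap, List.map_replicate]
        rw [← hrep, List.append_assoc, ← pv_flat_append]
        exact ih _
      · simp only [hd, if_neg, Bool.false_eq_true, not_false_iff]
        have hone : pvFlat cells ++ [c, ' '] = pvFlat (cells ++ [c]) := by simp [pvFlat]
        rw [List.append_assoc, hone]
        exact ih _

-- prefix ++ " " ++ flattened cells = ' '-join of prefix and cells, plus a trailing space
theorem pv_flat_eq_join (w : List Char) (cells : List Char) :
    w ++ [' '] ++ pvFlat cells
      = PySem.Chars.join [' '] (w :: cells.map (fun c => [c])) ++ [' '] := by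
  induction cells using List.reverseRecOn with
  | nil => simp [pvFlat, PySem.Chars.join_singleton]
  | append_singleton cs c ih =>
      rw [pv_flat_append]
      have h1 : pvFlat [c] = [c, ' '] := rfl
      rw [h1, ← List.append_assoc, ih, List.map_append]
      have h2 : w :: (List.map (fun c => [c]) cs ++ List.map (fun c => [c]) [c])
          = (w :: List.map (fun c => [c]) cs) ++ [[c]] := by simp
      rw [h2, pv_join_append_singleton _ _ _ (by simp)]
      simp

-- rstrip fixes a ' '-join of a non-space word and non-space cells
theorem pv_join_rstrip (w : List Char)
    (hws : ∀ c ∈ w, PySem.Chars.isspace c = false) (cells : List Char)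
    (hcs : ∀ c ∈ cells, PySem.Chars.isspace c = false) :
    PySem.Chars.rstrip (PySem.Chars.join [' '] (w :: cells.map (fun c => [c])))
      = PySem.Chars.join [' '] (w :: cells.map (fun c => [c])) := by
  induction cells using List.reverseRecOn with
  | nil =>
      simp only [List.map_nil]
      rw [PySem.Chars.join_singleton]
      exact pv_rstrip_eq_self w hws
  | append_singleton cs c ih =>
      rw [List.map_append]
      have h2 : w :: (List.map (fun c => [c]) cs ++ List.map (fun c => [c]) [c])
          = (w :: List.map (fun c => [c]) cs) ++ [[c]] := by simp
      rw [h2, pv_join_append_singleton _ _ _ (by simp)]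
      exact pv_rstrip_append_nonspace _ c (hcs c (by simp))

-- the per-rank equality: rstrip of A's interleaved row = B's ' '-join of the cells
theorem pv_row_eq (w : List Char) (hws : ∀ c ∈ w, PySem.Chars.isspace c = false)
    (rank : List Char) (hcs : ∀ c ∈ pvExpandRank rank, PySem.Chars.isspace c = false) :
    PySem.Chars.rstrip (rank.foldl (fun row c =>
        if PySem.Chars.isdigit c then
          row ++ PySem.List.pyRepeat ['.', ' '] ((PySem.Int.ofChars? [c]).getD 0)
        else row ++ [c, ' ']) (w ++ [' ']))
      = PySem.Chars.join [' '] (w :: (pvExpandRank rank).map (fun c => [c])) := by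
  have h0 : w ++ [' '] = (w ++ [' ']) ++ pvFlat [] := by simp [pvFlat]
  rw [h0, pv_inner_fold rank (w ++ [' ']) []]
  show PySem.Chars.rstrip (w ++ [' '] ++ pvFlat (pvExpandRank rank)) = _
  rw [pv_flat_eq_join w (pvExpandRank rank), pv_rstrip_append_space]
  exact pv_join_rstrip w hws (pvExpandRank rank) hcs

-- cells produced by pvExpandRank are '.' or chars of the rank, hence never whitespace
theorem pv_expandRank_not_space (rank : List Char)
    (hr : ∀ c ∈ rank, PySem.Chars.isspace c = false) :
    ∀ c ∈ pvExpandRank rank, PySem.Chars.isspace c = false := by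
  intro c hc
  rw [pv_expandRank_eq_flatMap] at hc
  rcases List.mem_flatMap.mp hc with ⟨x, hx, hcx⟩
  by_cases hd : PySem.Chars.isdigit x = true
  · rw [pv_mem_subst_digit x hd c hcx]; decide
  · have : pvSubst x = [x] := by simp [pvSubst, hd]
    rw [this] at hcx
    rw [List.mem_singleton.mp hcx]
    exact hr x hx

-- every char of every piece of s.split() is non-whitespace
theorem pv_split₀_go_not_space (s cur : List Char) (acc : List (List Char))
    (hcur : ∀ c ∈ cur, PySem.Chars.isspace c = false)
    (hacc : ∀ p ∈ acc, ∀ c ∈ p, PySem.Chars.isspace c = false) :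
    ∀ p ∈ PySem.Chars.split₀.go s cur acc, ∀ c ∈ p, PySem.Chars.isspace c = false := by
  induction s generalizing cur acc with
  | nil =>
      intro p hp
      simp only [PySem.Chars.split₀.go] at hp
      split at hp
      · exact hacc p (by simpa using hp)
      · rcases (show p ∈ acc ∨ p = cur.reverse by simpa using hp) with h | h
        · exact hacc p h
        · subst h; intro c hc; exact hcur c (by simpa using hc)
  | cons c rest ih =>
      intro p hp
      simp only [PySem.Chars.split₀.go] at hp
      split at hp
      · split at hp
        · exact ih [] acc (by simp) hacc p hp
        · refine ih [] _ (by simp) ?_ p hp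
          intro q hq
          rcases List.mem_cons.mp hq with h | h
          · subst h; intro x hx; exact hcur x (by simpa using hx)
          · exact hacc q h
      · next hns =>
          refine ih (c :: cur) acc ?_ hacc p hp
          intro x hx
          rcases List.mem_cons.mp hx with h | h
          · subst h; exact Bool.not_eq_true _ ▸ (by simpa using hns)
          · exact hcur x h

theorem pv_split₀_not_space (s : List Char) :
    ∀ p ∈ PySem.Chars.split₀ s, ∀ c ∈ p, PySem.Chars.isspace c = false :=
  pv_split₀_go_not_space s [] [] (by simp) (by simp)

-- every char of every piece of s.split(sep) comes from s (or cur/acc)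
theorem pv_splitOn_go_subset (sep : List Char) (fuel : Nat) (l cur : List Char)
    (acc : List (List Char)) :
    ∀ p ∈ PySem.Chars.splitOn.go sep fuel l cur acc, ∀ c ∈ p,
      c ∈ l ∨ c ∈ cur ∨ ∃ q ∈ acc, c ∈ q := by
  induction fuel generalizing l cur acc with
  | zero =>
      intro p hp c hc
      simp only [PySem.Chars.splitOn.go] at hp
      rcases (show p ∈ acc ∨ p = cur.reverse ++ l by simpa using hp) with h | h
      · exact Or.inr (Or.inr ⟨p, h, hc⟩)
      · subst h
        rcases List.mem_append.mp hc with h' | h'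
        · exact Or.inr (Or.inl (by simpa using h'))
        · exact Or.inl h'
  | succ f ih =>
      intro p hp c hc
      match l with
      | [] =>
          simp only [PySem.Chars.splitOn.go] at hp
          rcases (show p ∈ acc ∨ p = cur.reverse by simpa using hp) with h | h
          · exact Or.inr (Or.inr ⟨p, h, hc⟩)
          · subst h; exact Or.inr (Or.inl (by simpa using hc))
      | x :: rest =>
          simp only [PySem.Chars.splitOn.go] at hp
          split at hp
          · rcases ih _ _ _ p hp c hc with h | h | ⟨q, hq, hcq⟩
            · exact Or.inl (List.mem_of_mem_drop h)
            · exact absurd h (List.not_mem_nil)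
            · rcases List.mem_cons.mp hq with h' | h'
              · subst h'; exact Or.inr (Or.inl (by simpa using hcq))
              · exact Or.inr (Or.inr ⟨q, h', hcq⟩)
          · rcases ih _ _ _ p hp c hc with h | h | ⟨q, hq, hcq⟩
            · exact Or.inl (by simp [h])
            · rcases List.mem_cons.mp h with h' | h'
              · subst h'; exact Or.inl (by simp)
              · exact Or.inr (Or.inl h')
            · exact Or.inr (Or.inr ⟨q, hq, hcq⟩)

theorem pv_splitOn_subset (s sep : List Char) :
    ∀ p ∈ PySem.Chars.splitOn s sep, ∀ c ∈ p, c ∈ s := by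
  intro p hp c hc
  rcases pv_splitOn_go_subset sep (s.length + 1) s [] [] p hp c hc with h | h | ⟨q, hq, _⟩
  · exact h
  · exact absurd h (List.not_mem_nil)
  · exact absurd hq (List.not_mem_nil)

-- ===== VERDICT (by name: the statement is the Claim_ definition above) =====
set_option maxHeartbeats 1000000 in
theorem fen_to_ascii_board_spec : Claim_equal_fen_to_ascii_board := by
  intro fen _hdom hpre
  unfold Spec_fen_to_ascii_board fen_to_ascii_board fen_to_ascii_board_alt
  simp only []
  set board_fen := (PySem.Chars.split₀ fen.toList).getD 0 [] with hbf
  set ranks := PySem.Chars.splitOn board_fen ['/'] with hranks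
  rw [PySem.List.foldl_append_singleton_eq_map
        (fun p : Int × List Char => PySem.Chars.rstrip
          (p.2.foldl (fun row c =>
            if PySem.Chars.isdigit c then
              row ++ PySem.List.pyRepeat ['.', ' '] ((PySem.Int.ofChars? [c]).getD 0)
            else row ++ [c, ' ']) (PySem.Int.toChars (8 - p.1) ++ [' '])))]
  simp only [pv_expand_eq_expandRank]
  congr 2
  congr 1
  congr 1
  apply List.map_congr_left
  intro p hp
  have hbf_mem : ∀ c ∈ board_fen, PySem.Chars.isspace c = false := by
    have hne : PySem.Chars.split₀ fen.toList ≠ [] := hpre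
    have : board_fen ∈ PySem.Chars.split₀ fen.toList := by
      rw [hbf]
      cases h : PySem.Chars.split₀ fen.toList with
      | nil => exact absurd h hne
      | cons q qs => simp
    exact pv_split₀_not_space fen.toList board_fen this
  have hrank_mem : ∀ c ∈ p.2, PySem.Chars.isspace c = false := by
    intro c hc
    have hp2 : p.2 ∈ ranks := by
      rcases (PySem.List.mem_enumerate_iff _ _ _).mp hp with ⟨k, hk, rfl⟩
      simp
    exact hbf_mem c (pv_splitOn_subset board_fen ['/'] p.2 hp2 c hc)
  exact pv_row_eq (PySem.Int.toChars (8 - p.1)) (pv_toChars_not_space (8 - p.1)) p.2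
    (pv_expandRank_not_space p.2 hrank_mem)
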